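-- pv_equiv track=rewrite | github.com/Samuel-2000/VUT-FIT-BIT-Projekty | ISJ/ISJ_projekty/proj/isj_proj3_xkucht11.py | to_pilot_alpha
-- ===== SOURCE A (Python) =====
-- def to_pilot_alpha(word):
--     pilot_alpha = ['Alfa', 'Bravo', 'Charlie', 'Delta', 'Echo', 'Foxtrot',
--                    'Golf', 'Hotel', 'India', 'Juliett', 'Kilo', 'Lima', 'Mike',
--                    'November', 'Oscar', 'Papa', 'Quebec', 'Romeo', 'Sierra', 'Tango',
--                    'Uniform', 'Victor', 'Whiskey', 'Xray', 'Yankee', 'Zulu']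
--
--     pilot_alpha_list = []
--
--     for letter in word:
--         for code in pilot_alpha:
--             if letter.upper() == code[0]:
--                 pilot_alpha_list.append(code)
--                 break
--
--     return pilot_alpha_list
-- ===== SOURCE B (Python) =====
-- def to_pilot_alpha(word):
--     pilot_alpha = ['Alfa', 'Bravo', 'Charlie', 'Delta', 'Echo', 'Foxtrot',
--                    'Golf', 'Hotel', 'India', 'Juliett', 'Kilo', 'Lima', 'Mike',
--                    'November', 'Oscar', 'Papa', 'Quebec', 'Romeo', 'Sierra', 'Tango',
--                    'Uniform', 'Victor', 'Whiskey', 'Xray', 'Yankee', 'Zulu']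
--     out = []
--     for letter in word:
--         if 'a' <= letter <= 'z' or 'A' <= letter <= 'Z':
--             out.append(pilot_alpha[ord(letter.upper()) - ord('A')])
--     return out
-- ===== Notes on version B (the rewrite author's own statement) =====
-- stated objective: idiomatic
-- what changed: Replaces A's inner 26-element linear scan of the code list per character with an ASCII-letter range test and direct arithmetic indexing by the letter's alphabet position, one pass with O(1) addressing.
import Mathlib
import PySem

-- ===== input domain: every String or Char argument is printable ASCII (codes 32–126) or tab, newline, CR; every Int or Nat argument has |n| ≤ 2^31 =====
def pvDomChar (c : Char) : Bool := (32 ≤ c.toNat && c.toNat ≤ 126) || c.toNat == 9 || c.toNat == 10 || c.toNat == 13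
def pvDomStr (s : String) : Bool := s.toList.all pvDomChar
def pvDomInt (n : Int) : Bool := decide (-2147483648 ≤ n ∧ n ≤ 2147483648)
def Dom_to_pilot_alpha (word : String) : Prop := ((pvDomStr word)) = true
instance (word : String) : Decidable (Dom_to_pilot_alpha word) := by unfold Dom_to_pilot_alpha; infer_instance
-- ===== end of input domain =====

-- B replaces A's inner 26-element scan per character with an ASCII-letter range test
-- and direct arithmetic indexing into the table (objective: idiomatic single pass).

-- the NATO table (shared literal data of both programs)
def pilotAlphabet : List String :=
  ["Alfa", "Bravo", "Charlie", "Delta", "Echo", "Foxtrot",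
   "Golf", "Hotel", "India", "Juliett", "Kilo", "Lima", "Mike",
   "November", "Oscar", "Papa", "Quebec", "Romeo", "Sierra", "Tango",
   "Uniform", "Victor", "Whiskey", "Xray", "Yankee", "Zulu"]

-- ===== PORT A =====
-- inner loop of A: scan the codes, append the first whose code[0] equals letter.upper(), break
def pilotInnerA (letter : Char) (acc : List String) : List String → List String
  | [] => acc
  | code :: rest =>
      -- letter.upper() == code[0]: compare as character lists (code[0] is a 1-char string)
      if (PySem.Str.upper (String.ofList [letter])).toList = (PySem.Str.pyGet? code 0).toList then
        acc ++ [code]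
      else
        pilotInnerA letter acc rest

def to_pilot_alpha (word : String) : List String :=
  word.toList.foldl (fun acc letter => pilotInnerA letter acc pilotAlphabet) []

-- ===== PORT B =====
def to_pilot_alpha_alt (word : String) : List String :=
  word.toList.foldl (fun acc letter =>
    if ('a' ≤ letter ∧ letter ≤ 'z') ∨ ('A' ≤ letter ∧ letter ≤ 'Z') then
      -- pilot_alpha[ord(letter.upper()) - ord('A')]: index provably in range under the guard
      acc ++ [(PySem.List.pyGet? pilotAlphabet (((PySem.Chars.upperChar letter).toNat : Int) - 65)).getD ""]
    else acc) []

-- ===== PRECONDITION & SPEC =====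
def Spec_to_pilot_alpha (word : String) (out : List String) : Prop := out = to_pilot_alpha_alt word
instance (word : String) (out : List String) : Decidable (Spec_to_pilot_alpha word out) := by unfold Spec_to_pilot_alpha; infer_instance

-- ===== CLAIM (what is proved, stated in full; the proofs are below) =====
def Claim_equal_to_pilot_alpha : Prop := ∀ (word : String), Dom_to_pilot_alpha word → Spec_to_pilot_alpha word (to_pilot_alpha word)

-- ===== LEMMAS AND PROOFS =====

-- B's per-character contribution
def pilotStepB (letter : Char) : List String :=
  if ('a' ≤ letter ∧ letter ≤ 'z') ∨ ('A' ≤ letter ∧ letter ≤ 'Z') then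
    [(PySem.List.pyGet? pilotAlphabet (((PySem.Chars.upperChar letter).toNat : Int) - 65)).getD ""]
  else []

theorem pilotInnerA_acc (letter : Char) (acc : List String) (codes : List String) :
    pilotInnerA letter acc codes = acc ++ pilotInnerA letter [] codes := by
  induction codes with
  | nil => simp [pilotInnerA]
  | cons code rest ih =>
      by_cases h : (PySem.Str.upper (String.ofList [letter])).toList = (PySem.Str.pyGet? code 0).toList
      · simp [pilotInnerA, h]
      · simp only [pilotInnerA, if_neg h]; exact ih

set_option maxRecDepth 4096 in
set_option maxHeartbeats 1000000 in
theorem pilot_step_eq (letter : Char) (h : letter.toNat ≤ 126) :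
    pilotInnerA letter [] pilotAlphabet = pilotStepB letter := by
  have key : ∀ n < 127,
      pilotInnerA (Char.ofNat n) [] pilotAlphabet = pilotStepB (Char.ofNat n) := by decide
  have hc : Char.ofNat letter.toNat = letter := Char.ofNat_toNat letter
  have := key letter.toNat (by omega)
  rwa [hc] at this

theorem pilot_fold_eq (xs : List Char) (hall : ∀ c ∈ xs, pvDomChar c = true) :
    xs.foldl (fun acc letter => pilotInnerA letter acc pilotAlphabet) [] =
    xs.foldl (fun acc letter =>
      if ('a' ≤ letter ∧ letter ≤ 'z') ∨ ('A' ≤ letter ∧ letter ≤ 'Z') then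
        acc ++ [(PySem.List.pyGet? pilotAlphabet (((PySem.Chars.upperChar letter).toNat : Int) - 65)).getD ""]
      else acc) [] := by
  induction xs using List.reverseRecOn with
  | nil => rfl
  | append_singleton xs x ih =>
      have hx : x.toNat ≤ 126 := by
        have := hall x (by simp)
        simp [pvDomChar] at this
        omega
      have ihv := ih (fun c hc => hall c (by simp [hc]))
      simp only [List.foldl_append, List.foldl_cons, List.foldl_nil, ihv]
      rw [pilotInnerA_acc, pilot_step_eq x hx, pilotStepB]
      split <;> simp

-- ===== VERDICT (by name: the statement is the Claim_ definition above) =====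
theorem to_pilot_alpha_spec : Claim_equal_to_pilot_alpha := by
  intro word hdom
  unfold Spec_to_pilot_alpha to_pilot_alpha to_pilot_alpha_alt
  exact pilot_fold_eq word.toList
    (by simpa [Dom_to_pilot_alpha, pvDomStr, List.all_eq_true] using hdom)
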